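-- pv_equiv track=rewrite | github.com/nholtz/ca-steel-design | lib/hblib.py | UG_Angle
-- ===== SOURCE A (Python) =====
-- def UG_Angle(b):
--     """Return the usual gauge for a singe line of bolts on the leg
--     of an angle whose dimension is b (can be actual or nominal).
--     This implements one column of the table on page 6-173 of 11th
--     edition, third revised printing, of the CISC Handbook of Steel
--     Construction."""
--     gvs = [(44,25),
--            (51,29),
--            (64,35),
--            (76,45),
--            (89,50),
--            (102,65),
--            (127,75),
--            (152,90),
--            (178,100),
--            (203,115),
--            ]
--     for lsize,g in gvs:
--         if b <= lsize+0.5: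
--             return g
--     raise Exception(f'Leg size of {b} exceeds last value in Usual Gauge table.')
-- ===== SOURCE B (Python) =====
-- def UG_Angle(b):
--     """Return the usual gauge for a single line of bolts on the leg
--     of an angle whose dimension is b, via binary search over the
--     sorted boundary values of the CISC Usual Gauge table."""
--     boundaries = [44.5, 51.5, 64.5, 76.5, 89.5, 102.5, 127.5, 152.5, 178.5, 203.5]
--     gauges = [25, 29, 35, 45, 50, 65, 75, 90, 100, 115]
--     lo, hi = 0, len(boundaries)
--     while lo < hi:
--         mid = (lo + hi) // 2
--         if boundaries[mid] < b:
--             lo = mid + 1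
--         else:
--             hi = mid
--     if lo == len(gauges):
--         raise Exception(f'Leg size of {b} exceeds last value in Usual Gauge table.')
--     return gauges[lo]
-- ===== Notes on version B (the rewrite author's own statement) =====
-- stated objective: alternative
-- what changed: Replaced the linear scan over the (threshold,gauge) pair table with a binary search (hand-rolled bisect_left) over a sorted boundary list indexing a parallel gauge list.
import Mathlib
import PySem

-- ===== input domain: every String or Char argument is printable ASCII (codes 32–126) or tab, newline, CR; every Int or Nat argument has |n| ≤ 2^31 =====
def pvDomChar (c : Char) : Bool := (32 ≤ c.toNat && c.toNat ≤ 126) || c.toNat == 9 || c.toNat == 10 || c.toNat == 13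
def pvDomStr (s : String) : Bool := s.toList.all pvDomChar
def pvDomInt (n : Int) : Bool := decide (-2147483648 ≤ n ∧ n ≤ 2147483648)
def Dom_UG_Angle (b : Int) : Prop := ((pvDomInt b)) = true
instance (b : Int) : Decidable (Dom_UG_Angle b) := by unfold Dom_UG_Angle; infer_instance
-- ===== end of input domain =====

-- B replaces A's linear scan of the pair table with a binary search over a sorted
-- boundary list with a parallel gauge list (alternative decomposition).

-- ===== PORT A =====
-- A's loop over the pair table; b is an Int, so Python's `b <= lsize + 0.5`
-- holds exactly when `b ≤ lsize` (exact on integer inputs).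
-- The post-loop `raise` is excluded by Pre_; the fall-through value 0 is unreachable there.
def ugGo (b : Int) : List (Int × Int) → Int
  | [] => 0
  | (lsize, g) :: rest => if b ≤ lsize then g else ugGo b rest

def UG_Angle (b : Int) : Int :=
  ugGo b [(44,25),(51,29),(64,35),(76,45),(89,50),(102,65),(127,75),(152,90),(178,100),(203,115)]

-- ===== PORT B =====
-- B's hand-rolled bisect_left loop (`while lo < hi`), ported with fuel = list length
-- (each step halves hi - lo, so 10 steps more than suffice).
-- The .5 boundaries are stored doubled (2*lsize + 1) and compared against 2*b,
-- which is exact for integer b: boundaries[mid] < b  ↔  2*lsize + 1 < 2*b.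
def bsGo (bs : List Int) (x : Int) : Nat → Nat → Nat → Nat
  | 0, lo, _ => lo
  | fuel + 1, lo, hi =>
    if lo < hi then
      let mid := (lo + hi) / 2
      if bs.getD mid 0 < x then bsGo bs x fuel (mid + 1) hi
      else bsGo bs x fuel lo mid
    else lo

def UG_Angle_alt (b : Int) : Int :=
  let boundaries : List Int := [89, 103, 129, 153, 179, 205, 255, 305, 357, 407]
  let gauges : List Int := [25, 29, 35, 45, 50, 65, 75, 90, 100, 115]
  let lo := bsGo boundaries (2 * b) boundaries.length 0 boundaries.length
  -- Pre_ guarantees lo < 10, so the raise branch (lo = 10) is unreachable; default 0.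
  gauges.getD lo 0

-- ===== PRECONDITION & SPEC =====
-- Pre_ excludes exactly the inputs where the Python A raises (b > 203, past the last table entry).
def Pre_UG_Angle (b : Int) : Prop := b ≤ 203
instance (b : Int) : Decidable (Pre_UG_Angle b) := by unfold Pre_UG_Angle; infer_instance
def pvWitness_UG_Angle : Int := 90

def Spec_UG_Angle (b : Int) (out : Int) : Prop := out = UG_Angle_alt b
instance (b : Int) (out : Int) : Decidable (Spec_UG_Angle b out) := by unfold Spec_UG_Angle; infer_instance

-- ===== CLAIM (what is proved, stated in full; the proofs are below) =====
def Claim_equal_UG_Angle : Prop := ∀ (b : Int), Dom_UG_Angle b → Pre_UG_Angle b → Spec_UG_Angle b (UG_Angle b)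

-- ===== LEMMAS AND PROOFS =====

-- ===== VERDICT (by name: the statement is the Claim_ definition above) =====
set_option maxHeartbeats 1000000 in
theorem UG_Angle_spec : Claim_equal_UG_Angle := by
  intro b _ hpre
  unfold Pre_UG_Angle at hpre
  unfold Spec_UG_Angle UG_Angle UG_Angle_alt
  by_cases h0 : b ≤ 44
  · simp [bsGo, ugGo, List.getD, h0, show ¬((89:Int) < 2*b) by omega, show ¬((103:Int) < 2*b) by omega, show ¬((129:Int) < 2*b) by omega, show ¬((205:Int) < 2*b) by omega]
  by_cases h1 : b ≤ 51
  · simp [bsGo, ugGo, List.getD, h0, h1, show (89:Int) < 2*b by omega, show ¬((103:Int) < 2*b) by omega, show ¬((129:Int) < 2*b) by omega, show ¬((205:Int) < 2*b) by omega]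
  by_cases h2 : b ≤ 64
  · simp [bsGo, ugGo, List.getD, h0, h1, h2, show (103:Int) < 2*b by omega, show ¬((129:Int) < 2*b) by omega, show ¬((205:Int) < 2*b) by omega]
  by_cases h3 : b ≤ 76
  · simp [bsGo, ugGo, List.getD, h0, h1, h2, h3, show (129:Int) < 2*b by omega, show ¬((153:Int) < 2*b) by omega, show ¬((179:Int) < 2*b) by omega, show ¬((205:Int) < 2*b) by omega]
  by_cases h4 : b ≤ 89
  · simp [bsGo, ugGo, List.getD, h0, h1, h2, h3, h4, show (129:Int) < 2*b by omega, show (153:Int) < 2*b by omega, show ¬((179:Int) < 2*b) by omega, show ¬((205:Int) < 2*b) by omega]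
  by_cases h5 : b ≤ 102
  · simp [bsGo, ugGo, List.getD, h0, h1, h2, h3, h4, h5, show (129:Int) < 2*b by omega, show (179:Int) < 2*b by omega, show ¬((205:Int) < 2*b) by omega]
  by_cases h6 : b ≤ 127
  · simp [bsGo, ugGo, List.getD, h0, h1, h2, h3, h4, h5, h6, show (205:Int) < 2*b by omega, show ¬((255:Int) < 2*b) by omega, show ¬((305:Int) < 2*b) by omega, show ¬((357:Int) < 2*b) by omega]
  by_cases h7 : b ≤ 152
  · simp [bsGo, ugGo, List.getD, h0, h1, h2, h3, h4, h5, h6, h7, show (205:Int) < 2*b by omega, show (255:Int) < 2*b by omega, show ¬((305:Int) < 2*b) by omega, show ¬((357:Int) < 2*b) by omega]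
  by_cases h8 : b ≤ 178
  · simp [bsGo, ugGo, List.getD, h0, h1, h2, h3, h4, h5, h6, h7, h8, show (205:Int) < 2*b by omega, show (305:Int) < 2*b by omega, show ¬((357:Int) < 2*b) by omega]
  · simp [bsGo, ugGo, List.getD, h0, h1, h2, h3, h4, h5, h6, h7, h8, hpre, show (205:Int) < 2*b by omega, show (357:Int) < 2*b by omega, show ¬((407:Int) < 2*b) by omega]
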